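-- pv_equiv track=rewrite | github.com/Cristhian-S1/iq-digits | cli/menu.py | _render_placement_mini
-- ===== SOURCE A (Python) =====
-- def _render_placement_mini(pl):
--     rows_used = [r for t, r, c in pl] + [r + 1 for t, r, c in pl if t == 'V']
--     cols_used = [c for t, r, c in pl] + [c + 1 for t, r, c in pl if t == 'H']
--     min_r, max_r = min(rows_used), max(rows_used)
--     min_c, max_c = min(cols_used), max(cols_used)
--     nr = max_r - min_r + 1
--     nc = max_c - min_c + 1
--     W = nc * 4 - 3
--     Hh = nr * 2 - 1
--     grid = [[' '] * W for _ in range(Hh)]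
--     for r in range(nr):
--         for c in range(nc):
--             grid[r * 2][c * 4] = '·'
--     for t, r, c in pl:
--         lr, lc = r - min_r, c - min_c
--         if t == 'H':
--             for k in range(1, 4):
--                 grid[lr * 2][lc * 4 + k] = '─'
--         else:
--             grid[lr * 2 + 1][lc * 4] = '│'
--     return '\n'.join(''.join(row) for row in grid)
-- ===== SOURCE B (Python) =====
-- def _render_placement_mini(pl):
--     rows_used = [r for t, r, c in pl] + [r + 1 for t, r, c in pl if t == 'V']
--     cols_used = [c for t, r, c in pl] + [c + 1 for t, r, c in pl if t == 'H']
--     min_r, max_r = min(rows_used), max(rows_used)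
--     min_c, max_c = min(cols_used), max(cols_used)
--     nr = max_r - min_r + 1
--     nc = max_c - min_c + 1
--     W = nc * 4 - 3
--     Hh = nr * 2 - 1
--     hcols = [set() for _ in range(Hh)]
--     vcols = [set() for _ in range(Hh)]
--     for t, r, c in pl:
--         lr, lc = r - min_r, c - min_c
--         if t == 'H':
--             hcols[lr * 2].update((lc * 4 + 1, lc * 4 + 2, lc * 4 + 3))
--         else:
--             vcols[lr * 2 + 1].add(lc * 4)
--     return '\n'.join(
--         ''.join('─' if x in hcols[y]
--                 else '│' if x in vcols[y]
--                 else '·' if y % 2 == 0 and x % 4 == 0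
--                 else ' '
--                 for x in range(W))
--         for y in range(Hh))
-- ===== Notes on version B (the rewrite author's own statement) =====
-- stated objective: alternative
-- what changed: Replaced A's allocation and in-place mutation of a 2-D character grid (nested dot-painting loops plus per-placement cell writes) by bucketing the marked columns of each row into per-row sets and generating the output in one pass that classifies every (y,x) cell by set membership, with the dot background computed arithmetically (y%2==0 and x%4==0) instead of painted; no character grid is ever allocated or mutated.
import Mathlib
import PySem

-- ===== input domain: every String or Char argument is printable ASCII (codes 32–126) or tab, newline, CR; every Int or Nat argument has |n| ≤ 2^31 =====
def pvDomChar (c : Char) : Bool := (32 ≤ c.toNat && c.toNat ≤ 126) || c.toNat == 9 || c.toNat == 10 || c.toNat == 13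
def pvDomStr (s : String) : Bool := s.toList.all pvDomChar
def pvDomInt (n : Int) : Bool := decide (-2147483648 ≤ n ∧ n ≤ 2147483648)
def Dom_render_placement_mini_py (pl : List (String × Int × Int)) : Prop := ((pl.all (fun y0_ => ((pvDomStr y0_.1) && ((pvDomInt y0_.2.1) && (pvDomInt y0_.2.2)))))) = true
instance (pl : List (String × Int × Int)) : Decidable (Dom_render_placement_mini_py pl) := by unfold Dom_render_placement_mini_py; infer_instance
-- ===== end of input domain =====

-- B replaces A's allocated, mutated 2-D character grid by per-row sets of marked columns and one
-- pass that classifies each cell by set membership, with the dot background computed arithmetically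
-- (objective: alternative, same cost).

-- ===== PORT A =====
-- Python 'g[y][x] = ch' (row fetched, then mutated in place): exact whenever y and x are in
-- range, which Pre_ guarantees on every write A performs (out of range, Python raises IndexError
-- and the input is outside Pre_; pySetD/pyGetD are total stand-ins there).
def pyWrite2 (g : List (List Char)) (y x : Int) (ch : Char) : List (List Char) :=
  PySem.List.pySetD g y (PySem.List.pySetD (PySem.List.pyGetD g y []) x ch)

def render_placement_mini_py (pl : List (String × Int × Int)) : String :=
  let rows_used : List Int :=
    pl.map (fun p => p.2.1) ++ (pl.filter (fun p => p.1 == "V")).map (fun p => p.2.1 + 1)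
  let cols_used : List Int :=
    pl.map (fun p => p.2.2) ++ (pl.filter (fun p => p.1 == "H")).map (fun p => p.2.2 + 1)
  match PySem.List.min? rows_used (fun x => x), PySem.List.max? rows_used (fun x => x),
        PySem.List.min? cols_used (fun x => x), PySem.List.max? cols_used (fun x => x) with
  | some min_r, some max_r, some min_c, some max_c =>
    let nr := max_r - min_r + 1
    let nc := max_c - min_c + 1
    let W := nc * 4 - 3
    let Hh := nr * 2 - 1
    let grid : List (List Char) := List.replicate Hh.toNat (List.replicate W.toNat ' ')
    let grid := (PySem.List.pyRange 0 nr 1).foldl (fun g r =>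
      (PySem.List.pyRange 0 nc 1).foldl (fun g c => pyWrite2 g (r * 2) (c * 4) '·') g) grid
    let grid := pl.foldl (fun g p =>
      let lr := p.2.1 - min_r
      let lc := p.2.2 - min_c
      if p.1 == "H" then
        (PySem.List.pyRange 1 4 1).foldl (fun g k => pyWrite2 g (lr * 2) (lc * 4 + k) '─') g
      else
        pyWrite2 g (lr * 2 + 1) (lc * 4) '│') grid
    String.intercalate "\n" (grid.map (fun row => String.mk row))
  | _, _, _, _ => ""   -- Python raises ValueError (min of an empty sequence) here; outside Pre_

-- ===== PORT B =====
-- Python 'vcols[lr * 2 + 1].add(...)' indexes the per-row bucket list: out of range Python raises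
-- IndexError and the input is outside Pre_; pyGetD/pySetD are total stand-ins there. 'hcols[lr*2]'
-- is always in range. Only membership in the per-row sets is consumed, so PySem.Set is exact.
def render_placement_mini_py_alt (pl : List (String × Int × Int)) : String :=
  let rows_used : List Int :=
    pl.map (fun p => p.2.1) ++ (pl.filter (fun p => p.1 == "V")).map (fun p => p.2.1 + 1)
  let cols_used : List Int :=
    pl.map (fun p => p.2.2) ++ (pl.filter (fun p => p.1 == "H")).map (fun p => p.2.2 + 1)
  match PySem.List.min? rows_used (fun x => x) with
  | none => ""   -- Python raises ValueError (min of an empty sequence) here; outside Pre_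
  | some min_r =>
  match PySem.List.max? rows_used (fun x => x) with
  | none => ""
  | some max_r =>
  match PySem.List.min? cols_used (fun x => x) with
  | none => ""
  | some min_c =>
  match PySem.List.max? cols_used (fun x => x) with
  | none => ""
  | some max_c =>
    let nr := max_r - min_r + 1
    let nc := max_c - min_c + 1
    let W := nc * 4 - 3
    let Hh := nr * 2 - 1
    let hv := pl.foldl (fun (st : List (PySem.Set Int) × List (PySem.Set Int)) p =>
      let lr := p.2.1 - min_r
      let lc := p.2.2 - min_c
      if p.1 == "H" then
        (PySem.List.pySetD st.1 (lr * 2)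
          (PySem.Set.update (PySem.List.pyGetD st.1 (lr * 2) []) [lc * 4 + 1, lc * 4 + 2, lc * 4 + 3]), st.2)
      else
        (st.1, PySem.List.pySetD st.2 (lr * 2 + 1)
          (PySem.Set.add (PySem.List.pyGetD st.2 (lr * 2 + 1) []) (lc * 4))))
      (List.replicate Hh.toNat ([] : PySem.Set Int), List.replicate Hh.toNat ([] : PySem.Set Int))
    String.intercalate "\n" ((PySem.List.pyRange 0 Hh 1).map (fun y =>
      String.mk ((PySem.List.pyRange 0 W 1).map (fun x =>
        if PySem.Set.contains (PySem.List.pyGetD hv.1 y []) x then '─'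
        else if PySem.Set.contains (PySem.List.pyGetD hv.2 y []) x then '│'
        else if y % 2 == 0 && x % 4 == 0 then '·'
        else ' '))))

-- ===== PRECONDITION & SPEC =====
-- Pre_ holds exactly where Python A returns: it excludes the empty list (ValueError from min())
-- and placements whose tag is not 'H' and which lie on the bottom-most used row with no 'V'
-- extending past them, where A's else-branch writes below the grid (IndexError).
def Pre_render_placement_mini_py (pl : List (String × Int × Int)) : Prop :=
  pl ≠ [] ∧ ∀ p ∈ pl, p.1 = "H" ∨
    ∃ q ∈ pl, p.2.1 < q.2.1 ∨ (q.1 = "V" ∧ p.2.1 ≤ q.2.1)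
instance (pl : List (String × Int × Int)) : Decidable (Pre_render_placement_mini_py pl) := by
  unfold Pre_render_placement_mini_py; infer_instance

def pvWitness_render_placement_mini_py : (List (String × Int × Int)) := [("H", 0, 0)]

def Spec_render_placement_mini_py (pl : List (String × Int × Int)) (out : String) : Prop := out = render_placement_mini_py_alt pl
instance (pl : List (String × Int × Int)) (out : String) : Decidable (Spec_render_placement_mini_py pl out) := by unfold Spec_render_placement_mini_py; infer_instance

-- ===== CLAIM (what is proved, stated in full; the proofs are below) =====
def Claim_equal_render_placement_mini_py : Prop := ∀ (pl : List (String × Int × Int)), Dom_render_placement_mini_py pl → Pre_render_placement_mini_py pl → Spec_render_placement_mini_py pl (render_placement_mini_py pl)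

-- ===== LEMMAS AND PROOFS =====

def gget (g : List (List Char)) (y x : Nat) : Char := (g.getD y []).getD x ' '
def Rect (g : List (List Char)) (h w : Nat) : Prop :=
  g.length = h ∧ ∀ row ∈ g, row.length = w
def PBound (min_r min_c : Int) (h w : Nat) (p : String × Int × Int) : Prop :=
  0 ≤ p.2.1 - min_r ∧ 0 ≤ p.2.2 - min_c ∧
  (if p.1 = "H" then (p.2.1 - min_r) * 2 < (h : Int) ∧ (p.2.2 - min_c) * 4 + 3 < (w : Int)
   else (p.2.1 - min_r) * 2 + 1 < (h : Int) ∧ (p.2.2 - min_c) * 4 < (w : Int))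

-- the cells painted by the placements, as Bool predicates on Int coordinates
def HcellB (mr mc : Int) (s : List (String × Int × Int)) (y x : Int) : Bool :=
  s.any (fun p => p.1 == "H" && decide (y = (p.2.1 - mr) * 2)
    && decide (1 ≤ x - (p.2.2 - mc) * 4 ∧ x - (p.2.2 - mc) * 4 ≤ 3))
def VcellB (mr mc : Int) (s : List (String × Int × Int)) (y x : Int) : Bool :=
  s.any (fun p => !(p.1 == "H") && decide (y = (p.2.1 - mr) * 2 + 1)
    && decide (x = (p.2.2 - mc) * 4))

def stepA (mr mc : Int) (g : List (List Char)) (p : String × Int × Int) : List (List Char) :=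
  let lr := p.2.1 - mr
  let lc := p.2.2 - mc
  if p.1 == "H" then
    (PySem.List.pyRange 1 4 1).foldl (fun g k => pyWrite2 g (lr * 2) (lc * 4 + k) '─') g
  else
    pyWrite2 g (lr * 2 + 1) (lc * 4) '│'

theorem pyRange14 : PySem.List.pyRange 1 4 1 = [1, 2, 3] := by decide

theorem write2_eq {g : List (List Char)} {y x : Int} (hy0 : 0 ≤ y) (hx0 : 0 ≤ x)
    (ch : Char) :
    pyWrite2 g y x ch = g.set y.toNat ((g.getD y.toNat []).set x.toNat ch) := by
  unfold pyWrite2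
  rw [PySem.List.pySetD_of_nonneg _ _ hy0, PySem.List.pyGetD_of_nonneg _ _ hy0,
      PySem.List.pySetD_of_nonneg _ _ hx0]

theorem rect_write2 {g : List (List Char)} {h w : Nat} (hr : Rect g h w)
    {y x : Int} (hy0 : 0 ≤ y) (hx0 : 0 ≤ x) (hy : y.toNat < h)
    (ch : Char) : Rect (pyWrite2 g y x ch) h w := by
  obtain ⟨hl, hrow⟩ := hr
  rw [write2_eq hy0 hx0]
  refine ⟨by simp [hl], ?_⟩
  intro row hm
  rcases List.mem_or_eq_of_mem_set hm with h1 | h1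
  · exact hrow _ h1
  · subst h1
    rw [List.length_set, List.getD_eq_getElem _ _ (by omega : y.toNat < g.length)]
    exact hrow _ (List.getElem_mem _)

theorem getD_set {α : Type} (l : List α) (i j : Nat) (a : α) (d : α) :
    (l.set i a).getD j d = if i = j ∧ i < l.length then a else l.getD j d := by
  simp only [List.getD_eq_getElem?_getD, List.getElem?_set]
  by_cases hij : i = j
  · subst hij
    by_cases hl : i < l.length
    · simp [hl]
    · simp [hl]
  · simp [hij]

theorem gget_write2 {g : List (List Char)} {h w : Nat} (hr : Rect g h w)
    {y x : Int} (hy0 : 0 ≤ y) (hx0 : 0 ≤ x) (hy : y.toNat < h) (hx : x.toNat < w)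
    (ch : Char) (y' x' : Nat) :
    gget (pyWrite2 g y x ch) y' x' =
      if y' = y.toNat ∧ x' = x.toNat then ch else gget g y' x' := by
  obtain ⟨hl, hrow⟩ := hr
  have hylen : y.toNat < g.length := by omega
  have hrl : (g.getD y.toNat []).length = w := by
    rw [List.getD_eq_getElem _ _ hylen]; exact hrow _ (List.getElem_mem hylen)
  rw [write2_eq hy0 hx0]
  unfold gget
  rw [getD_set]
  by_cases hyy : y' = y.toNat
  · rw [if_pos ⟨hyy.symm, hylen⟩, getD_set, hyy]
    by_cases hxx : x' = x.toNat
    · rw [if_pos ⟨hxx.symm, by omega⟩, if_pos ⟨rfl, hxx⟩]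
    · rw [if_neg (fun hh => hxx hh.1.symm), if_neg (fun hh => hxx hh.2)]
  · rw [if_neg (fun hh => hyy hh.1.symm), if_neg (fun hh => hyy hh.1)]

theorem rowfillN (y0 : Int) (n : Nat) (g : List (List Char)) {h w : Nat}
    (hr : Rect g h w) (hy0 : 0 ≤ y0) (hy : y0.toNat < h)
    (hcb : ∀ c : Nat, c < n → 4 * c < w) :
    Rect ((List.range n).foldl (fun g (k : Nat) => pyWrite2 g y0 ((0 + (k : Int)) * 4) '·') g) h w ∧
    ∀ y x : Nat, gget ((List.range n).foldl (fun g (k : Nat) => pyWrite2 g y0 ((0 + (k : Int)) * 4) '·') g) y x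
      = if y = y0.toNat ∧ ∃ c : Nat, c < n ∧ x = 4 * c then '·' else gget g y x := by
  induction n with
  | zero => refine ⟨hr, ?_⟩; intro y x; simp
  | succ n ih =>
    obtain ⟨ihr, ihg⟩ := ih (fun c hc => hcb c (by omega))
    rw [List.range_succ, List.foldl_append, List.foldl_cons, List.foldl_nil]
    have hx0 : (0:Int) ≤ (0 + (n:Int)) * 4 := by positivity
    have hxN : ((0 + (n:Int)) * 4).toNat = 4 * n := by omega
    have hxw : ((0 + (n:Int)) * 4).toNat < w := by rw [hxN]; exact hcb n (by omega)
    refine ⟨rect_write2 ihr hy0 hx0 hy '·', ?_⟩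
    intro y x
    rw [gget_write2 ihr hy0 hx0 hy hxw '·' y x, ihg y x, hxN]
    by_cases h1 : y = y0.toNat ∧ x = 4 * n
    · rw [if_pos h1, if_pos ⟨h1.1, n, by omega, h1.2⟩]
    · rw [if_neg h1]
      by_cases h2 : y = y0.toNat ∧ ∃ c, c < n ∧ x = 4 * c
      · obtain ⟨hc, c, hcn, hxc⟩ := h2
        rw [if_pos ⟨hc, c, hcn, hxc⟩, if_pos ⟨hc, c, by omega, hxc⟩]
      · rw [if_neg h2]
        by_cases h3 : y = y0.toNat ∧ ∃ c, c < n + 1 ∧ x = 4 * c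
        · obtain ⟨hc, c, hcn, hxc⟩ := h3
          exfalso
          rcases Nat.lt_succ_iff_lt_or_eq.mp hcn with hlt | heq
          · exact h2 ⟨hc, c, hlt, hxc⟩
          · exact h1 ⟨hc, by omega⟩
        · rw [if_neg h3]

theorem inner_bridge (nc y0 : Int) (g : List (List Char)) :
    (PySem.List.pyRange 0 nc 1).foldl (fun g c => pyWrite2 g y0 (c * 4) '·') g
      = (List.range nc.toNat).foldl (fun g (k : Nat) => pyWrite2 g y0 ((0 + (k : Int)) * 4) '·') g := by
  rw [PySem.List.pyRange_one, List.foldl_map]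
  norm_num

theorem dotfillN (nc : Int) (n : Nat) (g : List (List Char)) {h w : Nat}
    (hr : Rect g h w) (hrb : ∀ r : Nat, r < n → 2 * r < h)
    (hcb : ∀ c : Nat, c < nc.toNat → 4 * c < w) :
    Rect ((List.range n).foldl (fun g (j : Nat) =>
        (PySem.List.pyRange 0 nc 1).foldl (fun g c => pyWrite2 g ((0 + (j : Int)) * 2) (c * 4) '·') g) g) h w ∧
    ∀ y x : Nat, gget ((List.range n).foldl (fun g (j : Nat) =>
        (PySem.List.pyRange 0 nc 1).foldl (fun g c => pyWrite2 g ((0 + (j : Int)) * 2) (c * 4) '·') g) g) y x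
      = if (∃ r : Nat, r < n ∧ y = 2 * r) ∧ (∃ c : Nat, c < nc.toNat ∧ x = 4 * c) then '·' else gget g y x := by
  induction n with
  | zero => refine ⟨hr, ?_⟩; intro y x; simp
  | succ n ih =>
    obtain ⟨ihr, ihg⟩ := ih (fun r hrn => hrb r (by omega))
    rw [List.range_succ, List.foldl_append, List.foldl_cons, List.foldl_nil]
    have hy0 : (0:Int) ≤ (0 + (n : Int)) * 2 := by positivity
    have hyN : ((0 + (n : Int)) * 2).toNat = 2 * n := by omega
    have hyh : ((0 + (n : Int)) * 2).toNat < h := by rw [hyN]; exact hrb n (by omega)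
    rw [inner_bridge]
    obtain ⟨rr, rg⟩ := rowfillN ((0 + (n : Int)) * 2) nc.toNat _ ihr hy0 hyh hcb
    refine ⟨rr, ?_⟩
    intro y x
    rw [rg y x, ihg y x, hyN]
    by_cases hx : ∃ c : Nat, c < nc.toNat ∧ x = 4 * c
    · by_cases h1 : y = 2 * n
      · rw [if_pos ⟨h1, hx⟩, if_pos ⟨⟨n, by omega, h1⟩, hx⟩]
      · rw [if_neg (fun hh => h1 hh.1)]
        by_cases h2 : ∃ r : Nat, r < n ∧ y = 2 * r
        · rw [if_pos ⟨h2, hx⟩]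
          obtain ⟨r, hrn, hyr⟩ := h2
          rw [if_pos ⟨⟨r, by omega, hyr⟩, hx⟩]
        · rw [if_neg (fun hh => h2 hh.1)]
          rw [if_neg]
          rintro ⟨⟨r, hrn, hyr⟩, -⟩
          rcases Nat.lt_succ_iff_lt_or_eq.mp hrn with hlt | heq
          · exact h2 ⟨r, hlt, hyr⟩
          · exact h1 (by omega)
    · rw [if_neg (fun hh => hx hh.2), if_neg (fun hh => hx hh.2), if_neg (fun hh => hx hh.2)]

theorem gget_replicate (n m : Nat) (y x : Nat) :
    gget (List.replicate n (List.replicate m ' ')) y x = ' ' := by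
  simp only [gget, List.getD_eq_getElem?_getD, List.getElem?_replicate]
  split_ifs <;> simp

theorem foldl_pyRange_zero' {α : Type} (n : Int) (f : α → Int → α) (a : α) :
    (PySem.List.pyRange 0 n 1).foldl f a
      = (List.range n.toNat).foldl (fun g (j : Nat) => f g (0 + (j : Int))) a := by
  rw [PySem.List.pyRange_one, List.foldl_map, Int.sub_zero]

-- unfolding of the Bool cell predicates into existentials
theorem HcellB_iff {mr mc : Int} {s : List (String × Int × Int)} {y x : Int} :
    HcellB mr mc s y x = true ↔
      ∃ p ∈ s, p.1 = "H" ∧ y = (p.2.1 - mr) * 2 ∧ 1 ≤ x - (p.2.2 - mc) * 4 ∧ x - (p.2.2 - mc) * 4 ≤ 3 := by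
  simp [HcellB, List.any_eq_true, and_assoc]
theorem VcellB_iff {mr mc : Int} {s : List (String × Int × Int)} {y x : Int} :
    VcellB mr mc s y x = true ↔
      ∃ p ∈ s, ¬ p.1 = "H" ∧ y = (p.2.1 - mr) * 2 + 1 ∧ x = (p.2.2 - mc) * 4 := by
  simp [VcellB, List.any_eq_true, and_assoc]

-- parity: H-cells live on even grid rows, V-cells on odd ones, so the two sets are disjoint
theorem Hcell_even {mr mc : Int} {s : List (String × Int × Int)} {y x : Int}
    (h : HcellB mr mc s y x = true) : y % 2 = 0 := by
  obtain ⟨p, _, _, hy, _⟩ := HcellB_iff.mp h; omega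
theorem Vcell_odd {mr mc : Int} {s : List (String × Int × Int)} {y x : Int}
    (h : VcellB mr mc s y x = true) : y % 2 = 1 := by
  obtain ⟨p, _, _, hy, _⟩ := VcellB_iff.mp h; omega

theorem Hcell_cons {mr mc : Int} {p : String × Int × Int} {s : List (String × Int × Int)} {y x : Int} :
    HcellB mr mc (p :: s) y x = (HcellB mr mc [p] y x || HcellB mr mc s y x) := by
  simp [HcellB, List.any_cons]

theorem Vcell_cons {mr mc : Int} {p : String × Int × Int} {s : List (String × Int × Int)} {y x : Int} :
    VcellB mr mc (p :: s) y x = (VcellB mr mc [p] y x || VcellB mr mc s y x) := by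
  simp [VcellB, List.any_cons]

theorem if3 (c1 c2 c3 : Prop) [Decidable c1] [Decidable c2] [Decidable c3] (A B : Char) :
    (if c3 then A else if c2 then A else if c1 then A else B)
      = if c1 ∨ c2 ∨ c3 then A else B := by
  split_ifs <;> tauto

-- one placement's step, cell-wise
theorem step_char {mr mc : Int} {h w : Nat} {g : List (List Char)} (hr : Rect g h w)
    (p : String × Int × Int) (hb : PBound mr mc h w p) :
    Rect (stepA mr mc g p) h w ∧
    ∀ y x : Nat, gget (stepA mr mc g p) y x =
      if HcellB mr mc [p] ↑y ↑x = true then '─'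
      else if VcellB mr mc [p] ↑y ↑x = true then '│'
      else gget g y x := by
  obtain ⟨hlr0, hlc0, hbnd⟩ := hb
  by_cases hH : p.1 = "H"
  · rw [if_pos hH] at hbnd
    have hHb : (p.1 == "H") = true := by simp [hH]
    have hy0 : (0:Int) ≤ (p.2.1 - mr) * 2 := by omega
    have hyh : ((p.2.1 - mr) * 2).toNat < h := by omega
    have hx1 : (0:Int) ≤ (p.2.2 - mc) * 4 + 1 := by omega
    have hx2 : (0:Int) ≤ (p.2.2 - mc) * 4 + 2 := by omega
    have hx3 : (0:Int) ≤ (p.2.2 - mc) * 4 + 3 := by omega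
    have hxw1 : ((p.2.2 - mc) * 4 + 1).toNat < w := by omega
    have hxw2 : ((p.2.2 - mc) * 4 + 2).toNat < w := by omega
    have hxw3 : ((p.2.2 - mc) * 4 + 3).toNat < w := by omega
    have hstep : stepA mr mc g p =
        pyWrite2 (pyWrite2 (pyWrite2 g ((p.2.1 - mr) * 2) ((p.2.2 - mc) * 4 + 1) '─')
          ((p.2.1 - mr) * 2) ((p.2.2 - mc) * 4 + 2) '─') ((p.2.1 - mr) * 2) ((p.2.2 - mc) * 4 + 3) '─' := by
      unfold stepA
      simp only [hHb, if_true, pyRange14, List.foldl_cons, List.foldl_nil]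
    have hr1 : Rect (pyWrite2 g ((p.2.1 - mr) * 2) ((p.2.2 - mc) * 4 + 1) '─') h w :=
      rect_write2 hr hy0 hx1 hyh '─'
    have hr2 : Rect (pyWrite2 (pyWrite2 g ((p.2.1 - mr) * 2) ((p.2.2 - mc) * 4 + 1) '─')
        ((p.2.1 - mr) * 2) ((p.2.2 - mc) * 4 + 2) '─') h w :=
      rect_write2 hr1 hy0 hx2 hyh '─'
    refine ⟨by rw [hstep]; exact rect_write2 hr2 hy0 hx3 hyh '─', ?_⟩
    intro y x
    rw [hstep, gget_write2 hr2 hy0 hx3 hyh hxw3 '─' y x,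
        gget_write2 hr1 hy0 hx2 hyh hxw2 '─' y x,
        gget_write2 hr hy0 hx1 hyh hxw1 '─' y x, if3]
    have hiff : ((y = ((p.2.1 - mr) * 2).toNat ∧ x = ((p.2.2 - mc) * 4 + 1).toNat) ∨
        (y = ((p.2.1 - mr) * 2).toNat ∧ x = ((p.2.2 - mc) * 4 + 2).toNat) ∨
        (y = ((p.2.1 - mr) * 2).toNat ∧ x = ((p.2.2 - mc) * 4 + 3).toNat))
        ↔ HcellB mr mc [p] ↑y ↑x = true := by
      rw [HcellB_iff]
      constructor
      · rintro (⟨h1, h2⟩ | ⟨h1, h2⟩ | ⟨h1, h2⟩) <;>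
          exact ⟨p, by simp, hH, by omega, by omega, by omega⟩
      · rintro ⟨q, hq, hqH, hy, hk1, hk3⟩
        simp only [List.mem_singleton] at hq
        rw [hq] at hy hk1 hk3
        rcases (by omega : (x : Int) = (p.2.2 - mc) * 4 + 1 ∨ (x : Int) = (p.2.2 - mc) * 4 + 2 ∨
            (x : Int) = (p.2.2 - mc) * 4 + 3) with hk | hk | hk
        · exact Or.inl ⟨by omega, by omega⟩
        · exact Or.inr (Or.inl ⟨by omega, by omega⟩)
        · exact Or.inr (Or.inr ⟨by omega, by omega⟩)
    rw [if_congr hiff rfl rfl]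
    by_cases hHc : HcellB mr mc [p] ↑y ↑x = true
    · rw [if_pos hHc, if_pos hHc]
    · rw [if_neg hHc, if_neg hHc, if_neg]
      intro hVc
      obtain ⟨q, hq, hqH, -⟩ := VcellB_iff.mp hVc
      simp only [List.mem_singleton] at hq
      rw [hq] at hqH
      exact hqH hH
  · rw [if_neg hH] at hbnd
    have hHb : (p.1 == "H") = false := by simp [hH]
    have hy0 : (0:Int) ≤ (p.2.1 - mr) * 2 + 1 := by omega
    have hyh : ((p.2.1 - mr) * 2 + 1).toNat < h := by omega
    have hx0 : (0:Int) ≤ (p.2.2 - mc) * 4 := by omega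
    have hxw : ((p.2.2 - mc) * 4).toNat < w := by omega
    have hstep : stepA mr mc g p = pyWrite2 g ((p.2.1 - mr) * 2 + 1) ((p.2.2 - mc) * 4) '│' := by
      unfold stepA
      simp only [hHb, Bool.false_eq_true, if_false]
    refine ⟨by rw [hstep]; exact rect_write2 hr hy0 hx0 hyh '│', ?_⟩
    intro y x
    rw [hstep, gget_write2 hr hy0 hx0 hyh hxw '│' y x]
    have hiff : (y = ((p.2.1 - mr) * 2 + 1).toNat ∧ x = ((p.2.2 - mc) * 4).toNat)
        ↔ VcellB mr mc [p] ↑y ↑x = true := by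
      rw [VcellB_iff]
      constructor
      · rintro ⟨h1, h2⟩
        exact ⟨p, by simp, hH, by omega, by omega⟩
      · rintro ⟨q, hq, hqH, hy, hx⟩
        simp only [List.mem_singleton] at hq
        rw [hq] at hy hx
        exact ⟨by omega, by omega⟩
    rw [if_congr hiff rfl rfl]
    by_cases hVc : VcellB mr mc [p] ↑y ↑x = true
    · rw [if_pos hVc, if_neg]
      intro hHc
      have := Hcell_even hHc
      have := Vcell_odd hVc
      omega
    · rw [if_neg hVc, if_neg]
      intro hHc
      obtain ⟨q, hq, hqH, -⟩ := HcellB_iff.mp hHc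
      simp only [List.mem_singleton] at hq
      rw [hq] at hqH
      exact hH hqH

-- the whole placement fold, cell-wise
theorem placefold (mr mc : Int) {h w : Nat} :
    ∀ (s : List (String × Int × Int)) (g : List (List Char)), Rect g h w →
    (∀ p ∈ s, PBound mr mc h w p) →
    Rect (s.foldl (stepA mr mc) g) h w ∧
    ∀ y x : Nat, gget (s.foldl (stepA mr mc) g) y x =
      if HcellB mr mc s ↑y ↑x = true then '─'
      else if VcellB mr mc s ↑y ↑x = true then '│'
      else gget g y x := by
  intro s
  induction s with
  | nil =>
    intro g hr _
    refine ⟨hr, ?_⟩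
    intro y x
    simp [HcellB, VcellB]
  | cons p s ih =>
    intro g hr hb
    obtain ⟨hr1, hg1⟩ := step_char hr p (hb p List.mem_cons_self)
    obtain ⟨hr2, hg2⟩ := ih (stepA mr mc g p) hr1 (fun q hq => hb q (List.mem_cons_of_mem _ hq))
    rw [List.foldl_cons]
    refine ⟨hr2, ?_⟩
    intro y x
    rw [hg2 y x, hg1 y x]
    by_cases hHs : HcellB mr mc s ↑y ↑x = true
    · rw [if_pos hHs, if_pos (show HcellB mr mc (p :: s) ↑y ↑x = true by rw [Hcell_cons, hHs, Bool.or_true])]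
    · rw [if_neg hHs]
      by_cases hVs : VcellB mr mc s ↑y ↑x = true
      · rw [if_pos hVs, if_neg, if_pos (show VcellB mr mc (p :: s) ↑y ↑x = true by rw [Vcell_cons, hVs, Bool.or_true])]
        intro hHc
        have := Hcell_even hHc
        have := Vcell_odd hVs
        omega
      · rw [if_neg hVs]
        by_cases hHp : HcellB mr mc [p] ↑y ↑x = true
        · rw [if_pos hHp, if_pos (show HcellB mr mc (p :: s) ↑y ↑x = true by rw [Hcell_cons, hHp, Bool.true_or])]
        · rw [if_neg hHp, if_neg (show ¬ HcellB mr mc (p :: s) ↑y ↑x = true by rw [Hcell_cons, Bool.or_eq_true]; tauto)]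
          by_cases hVp : VcellB mr mc [p] ↑y ↑x = true
          · rw [if_pos hVp, if_pos (show VcellB mr mc (p :: s) ↑y ↑x = true by rw [Vcell_cons, hVp, Bool.true_or])]
          · rw [if_neg hVp, if_neg (show ¬ VcellB mr mc (p :: s) ↑y ↑x = true by rw [Vcell_cons, Bool.or_eq_true]; tauto)]

theorem gget_eq_getElem (g : List (List Char)) (y x : Nat)
    (hy : y < g.length) (hx : x < (g[y]'hy).length) : (g[y]'hy)[x]'hx = gget g y x := by
  unfold gget
  rw [List.getD_eq_getElem _ _ hy, List.getD_eq_getElem _ _ hx]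

def bodyA (pl : List (String × Int × Int)) (min_r max_r min_c max_c : Int) : String :=
  let nr := max_r - min_r + 1
  let nc := max_c - min_c + 1
  let W := nc * 4 - 3
  let Hh := nr * 2 - 1
  let grid : List (List Char) := List.replicate Hh.toNat (List.replicate W.toNat ' ')
  let grid := (PySem.List.pyRange 0 nr 1).foldl (fun g r =>
    (PySem.List.pyRange 0 nc 1).foldl (fun g c => pyWrite2 g (r * 2) (c * 4) '·') g) grid
  let grid := pl.foldl (stepA min_r min_c) grid
  String.intercalate "\n" (grid.map (fun row => String.mk row))

def stepB (mr mc : Int) (st : List (PySem.Set Int) × List (PySem.Set Int))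
    (p : String × Int × Int) : List (PySem.Set Int) × List (PySem.Set Int) :=
  let lr := p.2.1 - mr
  let lc := p.2.2 - mc
  if p.1 == "H" then
    (PySem.List.pySetD st.1 (lr * 2)
      (PySem.Set.update (PySem.List.pyGetD st.1 (lr * 2) []) [lc * 4 + 1, lc * 4 + 2, lc * 4 + 3]), st.2)
  else
    (st.1, PySem.List.pySetD st.2 (lr * 2 + 1)
      (PySem.Set.add (PySem.List.pyGetD st.2 (lr * 2 + 1) []) (lc * 4)))

theorem contains_add_int (s : PySem.Set Int) (a x : Int) :
    PySem.Set.contains (PySem.Set.add s a) x = true ↔ (PySem.Set.contains s x = true ∨ x = a) := by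
  rw [PySem.Set.contains_iff, PySem.Set.mem_add, PySem.Set.contains_iff]

theorem contains_update3 (s : PySem.Set Int) (a b c x : Int) :
    PySem.Set.contains (PySem.Set.update s [a, b, c]) x = true
      ↔ (PySem.Set.contains s x = true ∨ x = a ∨ x = b ∨ x = c) := by
  rw [show PySem.Set.update s [a, b, c]
        = PySem.Set.add (PySem.Set.add (PySem.Set.add s a) b) c from rfl,
      contains_add_int, contains_add_int, contains_add_int]
  tauto

theorem HcellB_single_H {mr mc : Int} {p : String × Int × Int} (hH : p.1 = "H") {y x : Int} :
    HcellB mr mc [p] y x = true ↔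
      (y = (p.2.1 - mr) * 2 ∧ (x = (p.2.2 - mc) * 4 + 1 ∨ x = (p.2.2 - mc) * 4 + 2 ∨ x = (p.2.2 - mc) * 4 + 3)) := by
  rw [HcellB_iff]
  constructor
  · rintro ⟨q, hq, hqH, hy, hk1, hk3⟩
    simp only [List.mem_singleton] at hq
    rw [hq] at hy hk1 hk3
    exact ⟨hy, by omega⟩
  · rintro ⟨hy, hx⟩
    exact ⟨p, by simp, hH, hy, by omega, by omega⟩

theorem VcellB_single_V {mr mc : Int} {p : String × Int × Int} (hH : ¬ p.1 = "H") {y x : Int} :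
    VcellB mr mc [p] y x = true ↔
      (y = (p.2.1 - mr) * 2 + 1 ∧ x = (p.2.2 - mc) * 4) := by
  rw [VcellB_iff]
  constructor
  · rintro ⟨q, hq, hqH, hy, hx⟩
    simp only [List.mem_singleton] at hq
    rw [hq] at hy hx
    exact ⟨hy, hx⟩
  · rintro ⟨hy, hx⟩
    exact ⟨p, by simp, hH, hy, hx⟩

theorem HcellB_single_notH {mr mc : Int} {p : String × Int × Int} (hH : ¬ p.1 = "H") {y x : Int} :
    HcellB mr mc [p] y x = false := by
  rw [Bool.eq_false_iff]
  intro h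
  obtain ⟨q, hq, hqH, -⟩ := HcellB_iff.mp h
  simp only [List.mem_singleton] at hq
  rw [hq] at hqH
  exact hH hqH

theorem VcellB_single_H {mr mc : Int} {p : String × Int × Int} (hH : p.1 = "H") {y x : Int} :
    VcellB mr mc [p] y x = false := by
  rw [Bool.eq_false_iff]
  intro h
  obtain ⟨q, hq, hqH, -⟩ := VcellB_iff.mp h
  simp only [List.mem_singleton] at hq
  rw [hq] at hqH
  exact hqH hH

-- the bucketing fold, row-wise: each per-row set holds exactly the marked columns
theorem bucket (mr mc : Int) {h w : Nat} :
    ∀ (s : List (String × Int × Int)) (hl vl : List (PySem.Set Int)),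
    hl.length = h → vl.length = h →
    (∀ p ∈ s, PBound mr mc h w p) →
    (s.foldl (stepB mr mc) (hl, vl)).1.length = h ∧
    (s.foldl (stepB mr mc) (hl, vl)).2.length = h ∧
    ∀ (i : Nat) (x : Int), i < h →
      (PySem.Set.contains ((s.foldl (stepB mr mc) (hl, vl)).1.getD i []) x = true
        ↔ (PySem.Set.contains (hl.getD i []) x = true ∨ HcellB mr mc s ↑i x = true)) ∧
      (PySem.Set.contains ((s.foldl (stepB mr mc) (hl, vl)).2.getD i []) x = true
        ↔ (PySem.Set.contains (vl.getD i []) x = true ∨ VcellB mr mc s ↑i x = true)) := by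
  intro s
  induction s with
  | nil =>
    intro hl vl hhl hvl _
    refine ⟨hhl, hvl, ?_⟩
    intro i x _
    constructor <;> (constructor <;> simp [HcellB, VcellB])
  | cons p s ih =>
    intro hl vl hhl hvl hb
    obtain ⟨hlr0, hlc0, hbnd⟩ := hb p List.mem_cons_self
    rw [List.foldl_cons]
    by_cases hH : p.1 = "H"
    · rw [if_pos hH] at hbnd
      have hHb : (p.1 == "H") = true := by simp [hH]
      have hy0 : (0:Int) ≤ (p.2.1 - mr) * 2 := by omega
      have hyh : ((p.2.1 - mr) * 2).toNat < h := by omega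
      have hstep : stepB mr mc (hl, vl) p =
          (hl.set ((p.2.1 - mr) * 2).toNat
            (PySem.Set.update (hl.getD ((p.2.1 - mr) * 2).toNat [])
              [(p.2.2 - mc) * 4 + 1, (p.2.2 - mc) * 4 + 2, (p.2.2 - mc) * 4 + 3]), vl) := by
        unfold stepB
        simp only [hHb, if_true]
        rw [PySem.List.pyGetD_of_nonneg _ _ hy0, PySem.List.pySetD_of_nonneg _ _ hy0]
      rw [hstep]
      obtain ⟨ih1, ih2, ih3⟩ := ih (hl.set ((p.2.1 - mr) * 2).toNat
          (PySem.Set.update (hl.getD ((p.2.1 - mr) * 2).toNat [])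
            [(p.2.2 - mc) * 4 + 1, (p.2.2 - mc) * 4 + 2, (p.2.2 - mc) * 4 + 3])) vl
        (by rw [List.length_set]; exact hhl) hvl
        (fun q hq => hb q (List.mem_cons_of_mem _ hq))
      refine ⟨ih1, ih2, ?_⟩
      intro i x hi
      obtain ⟨ihH, ihV⟩ := ih3 i x hi
      constructor
      · rw [ihH, getD_set]
        by_cases hieq : i = ((p.2.1 - mr) * 2).toNat
        · subst hieq
          rw [if_pos ⟨rfl, by omega⟩, contains_update3, Hcell_cons, Bool.or_eq_true,
              HcellB_single_H hH]
          constructor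
          · rintro ((h1 | h1) | h1)
            · exact Or.inl h1
            · exact Or.inr (Or.inl ⟨by omega, h1⟩)
            · exact Or.inr (Or.inr h1)
          · rintro (h1 | (⟨-, h1⟩ | h1))
            · exact Or.inl (Or.inl h1)
            · exact Or.inl (Or.inr h1)
            · exact Or.inr h1
        · rw [if_neg (fun hh => hieq hh.1.symm), Hcell_cons, Bool.or_eq_true, HcellB_single_H hH]
          constructor
          · rintro (h1 | h1)
            · exact Or.inl h1
            · exact Or.inr (Or.inr h1)
          · rintro (h1 | (⟨h1, -⟩ | h1))
            · exact Or.inl h1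
            · exact absurd (by omega : i = ((p.2.1 - mr) * 2).toNat) hieq
            · exact Or.inr h1
      · rw [ihV, Vcell_cons, Bool.or_eq_true, VcellB_single_H hH]
        simp
    · rw [if_neg hH] at hbnd
      have hHb : (p.1 == "H") = false := by simp [hH]
      have hy0 : (0:Int) ≤ (p.2.1 - mr) * 2 + 1 := by omega
      have hyh : ((p.2.1 - mr) * 2 + 1).toNat < h := by omega
      have hstep : stepB mr mc (hl, vl) p =
          (hl, vl.set ((p.2.1 - mr) * 2 + 1).toNat
            (PySem.Set.add (vl.getD ((p.2.1 - mr) * 2 + 1).toNat []) ((p.2.2 - mc) * 4))) := by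
        unfold stepB
        simp only [hHb, Bool.false_eq_true, if_false]
        rw [PySem.List.pyGetD_of_nonneg _ _ hy0, PySem.List.pySetD_of_nonneg _ _ hy0]
      rw [hstep]
      obtain ⟨ih1, ih2, ih3⟩ := ih hl (vl.set ((p.2.1 - mr) * 2 + 1).toNat
          (PySem.Set.add (vl.getD ((p.2.1 - mr) * 2 + 1).toNat []) ((p.2.2 - mc) * 4)))
        hhl (by rw [List.length_set]; exact hvl)
        (fun q hq => hb q (List.mem_cons_of_mem _ hq))
      refine ⟨ih1, ih2, ?_⟩
      intro i x hi
      obtain ⟨ihH, ihV⟩ := ih3 i x hi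
      constructor
      · rw [ihH, Hcell_cons, Bool.or_eq_true, HcellB_single_notH hH]
        simp
      · rw [ihV, getD_set]
        by_cases hieq : i = ((p.2.1 - mr) * 2 + 1).toNat
        · subst hieq
          rw [if_pos ⟨rfl, by omega⟩, contains_add_int, Vcell_cons, Bool.or_eq_true,
              VcellB_single_V hH]
          constructor
          · rintro ((h1 | h1) | h1)
            · exact Or.inl h1
            · exact Or.inr (Or.inl ⟨by omega, h1⟩)
            · exact Or.inr (Or.inr h1)
          · rintro (h1 | (⟨-, h1⟩ | h1))
            · exact Or.inl (Or.inl h1)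
            · exact Or.inl (Or.inr h1)
            · exact Or.inr h1
        · rw [if_neg (fun hh => hieq hh.1.symm), Vcell_cons, Bool.or_eq_true, VcellB_single_V hH]
          constructor
          · rintro (h1 | h1)
            · exact Or.inl h1
            · exact Or.inr (Or.inr h1)
          · rintro (h1 | (⟨h1, -⟩ | h1))
            · exact Or.inl h1
            · exact absurd (by omega : i = ((p.2.1 - mr) * 2 + 1).toNat) hieq
            · exact Or.inr h1

def bodyB (pl : List (String × Int × Int)) (min_r max_r min_c max_c : Int) : String :=
  let nr := max_r - min_r + 1
  let nc := max_c - min_c + 1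
  let W := nc * 4 - 3
  let Hh := nr * 2 - 1
  let hv := pl.foldl (stepB min_r min_c)
    (List.replicate Hh.toNat ([] : PySem.Set Int), List.replicate Hh.toNat ([] : PySem.Set Int))
  String.intercalate "\n" ((PySem.List.pyRange 0 Hh 1).map (fun y =>
    String.mk ((PySem.List.pyRange 0 W 1).map (fun x =>
      if PySem.Set.contains (PySem.List.pyGetD hv.1 y []) x then '─'
      else if PySem.Set.contains (PySem.List.pyGetD hv.2 y []) x then '│'
      else if y % 2 == 0 && x % 4 == 0 then '·'
      else ' '))))

theorem core (pl : List (String × Int × Int)) (mr mR mc mC : Int)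
    (hmm : mr ≤ mR) (hcc : mc ≤ mC)
    (hb : ∀ p ∈ pl, mr ≤ p.2.1 ∧ p.2.1 ≤ mR ∧ mc ≤ p.2.2 ∧ p.2.2 ≤ mC ∧
      (p.1 = "H" → p.2.2 + 1 ≤ mC) ∧ (p.1 ≠ "H" → p.2.1 + 1 ≤ mR)) :
    bodyA pl mr mR mc mC = bodyB pl mr mR mc mC := by
  unfold bodyA bodyB
  simp only []
  rw [foldl_pyRange_zero']
  have hHh : ((mR - mr + 1) * 2 - 1).toNat = 2 * (mR - mr + 1).toNat - 1 := by omega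
  have hW : ((mC - mc + 1) * 4 - 3).toNat = 4 * (mC - mc + 1).toNat - 3 := by omega
  have hnr1 : 1 ≤ (mR - mr + 1).toNat := by omega
  have hnc1 : 1 ≤ (mC - mc + 1).toNat := by omega
  have rect0 : Rect (List.replicate ((mR - mr + 1) * 2 - 1).toNat (List.replicate ((mC - mc + 1) * 4 - 3).toNat ' '))
      ((mR - mr + 1) * 2 - 1).toNat ((mC - mc + 1) * 4 - 3).toNat := by
    refine ⟨List.length_replicate, ?_⟩
    intro row hm
    rw [List.eq_of_mem_replicate hm]
    exact List.length_replicate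
  obtain ⟨rect1, hg1⟩ := dotfillN (mC - mc + 1) (mR - mr + 1).toNat _ rect0
    (fun r hr => by omega) (fun c hc => by omega)
  have hPB : ∀ p ∈ pl, PBound mr mc ((mR - mr + 1) * 2 - 1).toNat ((mC - mc + 1) * 4 - 3).toNat p := by
    intro p hp
    obtain ⟨h1, h2, h3, h4, h5, h6⟩ := hb p hp
    refine ⟨by omega, by omega, ?_⟩
    by_cases hH : p.1 = "H"
    · rw [if_pos hH]
      have := h5 hH
      omega
    · rw [if_neg hH]
      have := h6 hH
      omega
  obtain ⟨rect2, hg2⟩ := placefold mr mc pl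
    ((List.range (mR - mr + 1).toNat).foldl (fun g (j : Nat) =>
      (PySem.List.pyRange 0 (mC - mc + 1) 1).foldl (fun g c => pyWrite2 g ((0 + (j : Int)) * 2) (c * 4) '·') g)
      (List.replicate ((mR - mr + 1) * 2 - 1).toNat (List.replicate ((mC - mc + 1) * 4 - 3).toNat ' ')))
    rect1 hPB
  congr 1
  apply List.ext_getElem
  · rw [List.length_map, List.length_map, PySem.List.length_pyRange_one, rect2.1]
    omega
  intro i hi1 hi2
  have hiH : i < ((mR - mr + 1) * 2 - 1).toNat := by
    rw [List.length_map, rect2.1] at hi1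
    exact hi1
  have hilen : i < (pl.foldl (stepA mr mc)
      ((List.range (mR - mr + 1).toNat).foldl (fun g (j : Nat) =>
        (PySem.List.pyRange 0 (mC - mc + 1) 1).foldl (fun g c => pyWrite2 g ((0 + (j : Int)) * 2) (c * 4) '·') g)
        (List.replicate ((mR - mr + 1) * 2 - 1).toNat (List.replicate ((mC - mc + 1) * 4 - 3).toNat ' ')))).length := by
    rw [rect2.1]; exact hiH
  simp only [List.getElem_map, PySem.List.getElem_pyRange_one]
  congr 1
  have hrowlen := rect2.2 _ (List.getElem_mem hilen)
  apply List.ext_getElem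
  · simp only [List.length_map, PySem.List.length_pyRange_one]
    omega
  intro j hj1 hj2
  have hjW : j < ((mC - mc + 1) * 4 - 3).toNat := by omega
  simp only [List.getElem_map, PySem.List.getElem_pyRange_one]
  rw [gget_eq_getElem _ i j hilen hj1, hg2 i j, hg1 i j, gget_replicate]
  simp only [Int.zero_add]
  obtain ⟨blen1, blen2, bmem⟩ := bucket mr mc pl
    (List.replicate ((mR - mr + 1) * 2 - 1).toNat ([] : PySem.Set Int))
    (List.replicate ((mR - mr + 1) * 2 - 1).toNat ([] : PySem.Set Int))
    List.length_replicate List.length_replicate hPB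
  obtain ⟨bmemH, bmemV⟩ := bmem i (↑j) hiH
  have hgetD0 : (List.replicate ((mR - mr + 1) * 2 - 1).toNat ([] : PySem.Set Int)).getD i []
      = ([] : PySem.Set Int) := by
    rw [List.getD_eq_getElem _ _ (by rw [List.length_replicate]; exact hiH)]
    exact List.getElem_replicate _
  rw [hgetD0] at bmemH bmemV
  have hcont0 : PySem.Set.contains ([] : PySem.Set Int) (↑j : Int) = true ↔ False := by
    rw [PySem.Set.contains_iff]
    simp
  rw [hcont0, false_or] at bmemH bmemV
  have hpyGet1 : PySem.List.pyGetD (pl.foldl (stepB mr mc)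
      (List.replicate ((mR - mr + 1) * 2 - 1).toNat ([] : PySem.Set Int),
       List.replicate ((mR - mr + 1) * 2 - 1).toNat ([] : PySem.Set Int))).1 (↑i) []
      = (pl.foldl (stepB mr mc)
      (List.replicate ((mR - mr + 1) * 2 - 1).toNat ([] : PySem.Set Int),
       List.replicate ((mR - mr + 1) * 2 - 1).toNat ([] : PySem.Set Int))).1.getD i [] := by
    rw [PySem.List.pyGetD_of_nonneg _ _ (by positivity), Int.toNat_natCast]
  have hpyGet2 : PySem.List.pyGetD (pl.foldl (stepB mr mc)
      (List.replicate ((mR - mr + 1) * 2 - 1).toNat ([] : PySem.Set Int),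
       List.replicate ((mR - mr + 1) * 2 - 1).toNat ([] : PySem.Set Int))).2 (↑i) []
      = (pl.foldl (stepB mr mc)
      (List.replicate ((mR - mr + 1) * 2 - 1).toNat ([] : PySem.Set Int),
       List.replicate ((mR - mr + 1) * 2 - 1).toNat ([] : PySem.Set Int))).2.getD i [] := by
    rw [PySem.List.pyGetD_of_nonneg _ _ (by positivity), Int.toNat_natCast]
  rw [hpyGet1, hpyGet2, if_congr bmemH rfl rfl, if_congr bmemV rfl rfl]
  have hdot : ((↑i : Int) % 2 == 0 && (↑j : Int) % 4 == 0) = true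
      ↔ ((∃ r : Nat, r < (mR - mr + 1).toNat ∧ i = 2 * r) ∧
         (∃ c : Nat, c < (mC - mc + 1).toNat ∧ j = 4 * c)) := by
    rw [Bool.and_eq_true, beq_iff_eq, beq_iff_eq]
    constructor
    · rintro ⟨h1, h2⟩
      exact ⟨⟨i / 2, by omega, by omega⟩, ⟨j / 4, by omega, by omega⟩⟩
    · rintro ⟨⟨r, hrn, hir⟩, ⟨c, hcn, hjc⟩⟩
      constructor <;> omega
  rw [if_congr hdot.symm rfl rfl]

-- ===== VERDICT (by name: the statement is the Claim_ definition above) =====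
theorem render_placement_mini_py_spec : Claim_equal_render_placement_mini_py := by
  intro pl hdom hpre
  unfold Spec_render_placement_mini_py
  obtain ⟨hne, hpre2⟩ := hpre
  unfold render_placement_mini_py render_placement_mini_py_alt
  simp only []
  rcases hm1 : PySem.List.min? (pl.map (fun p => p.2.1) ++ (pl.filter (fun p => p.1 == "V")).map (fun p => p.2.1 + 1)) (fun x => x) with _ | mr
  · rfl
  rcases hm2 : PySem.List.max? (pl.map (fun p => p.2.1) ++ (pl.filter (fun p => p.1 == "V")).map (fun p => p.2.1 + 1)) (fun x => x) with _ | mR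
  · rfl
  rcases hm3 : PySem.List.min? (pl.map (fun p => p.2.2) ++ (pl.filter (fun p => p.1 == "H")).map (fun p => p.2.2 + 1)) (fun x => x) with _ | mc
  · rfl
  rcases hm4 : PySem.List.max? (pl.map (fun p => p.2.2) ++ (pl.filter (fun p => p.1 == "H")).map (fun p => p.2.2 + 1)) (fun x => x) with _ | mC
  · rfl
  show bodyA pl mr mR mc mC = bodyB pl mr mR mc mC
  have hmemr : ∀ p ∈ pl, p.2.1 ∈ (pl.map (fun p => p.2.1) ++ (pl.filter (fun p => p.1 == "V")).map (fun p => p.2.1 + 1)) :=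
    fun p hp => List.mem_append_left _ (List.mem_map_of_mem hp)
  have hmemc : ∀ p ∈ pl, p.2.2 ∈ (pl.map (fun p => p.2.2) ++ (pl.filter (fun p => p.1 == "H")).map (fun p => p.2.2 + 1)) :=
    fun p hp => List.mem_append_left _ (List.mem_map_of_mem hp)
  have hmemcH : ∀ p ∈ pl, p.1 = "H" → p.2.2 + 1 ∈ (pl.map (fun p => p.2.2) ++ (pl.filter (fun p => p.1 == "H")).map (fun p => p.2.2 + 1)) := by
    intro p hp hH
    exact List.mem_append_right _ (List.mem_map_of_mem (List.mem_filter.mpr ⟨hp, by simp [hH]⟩))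
  have hmemrV : ∀ p ∈ pl, p.1 = "V" → p.2.1 + 1 ∈ (pl.map (fun p => p.2.1) ++ (pl.filter (fun p => p.1 == "V")).map (fun p => p.2.1 + 1)) := by
    intro p hp hV
    exact List.mem_append_right _ (List.mem_map_of_mem (List.mem_filter.mpr ⟨hp, by simp [hV]⟩))
  have hminr := PySem.List.min?_isMin hm1
  have hmaxr := PySem.List.max?_isMax hm2
  have hminc := PySem.List.min?_isMin hm3
  have hmaxc := PySem.List.max?_isMax hm4
  refine core pl mr mR mc mC ?_ ?_ ?_
  · exact hminr _ (PySem.List.max?_mem hm2)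
  · exact hminc _ (PySem.List.max?_mem hm4)
  · intro p hp
    refine ⟨hminr _ (hmemr p hp), hmaxr _ (hmemr p hp), hminc _ (hmemc p hp), hmaxc _ (hmemc p hp), ?_, ?_⟩
    · intro hH
      exact hmaxc _ (hmemcH p hp hH)
    · intro hH
      rcases hpre2 p hp with hH' | ⟨q, hq, hcase⟩
      · exact absurd hH' hH
      · rcases hcase with hlt | ⟨hV, hle⟩
        · have := hmaxr _ (hmemr q hq)
          omega
        · have := hmaxr _ (hmemrV q hq hV)
          omega
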